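-- pv_equiv track=rewrite | github.com/dmarx/video-killed-the-radio-star | vktrs/utils.py | sanitize_folder_name
-- ===== SOURCE A (Python) =====
-- import string
--
-- def sanitize_folder_name(fp):
--     outv = ''
--     whitelist = string.ascii_letters + string.digits + '-_'
--     for token in str(fp):
--         if token not in whitelist:
--             token = '-'
--         outv += token
--     return outv
-- ===== SOURCE B (Python) =====
-- import re
--
-- def sanitize_folder_name(fp):
--     return re.sub(r'[^A-Za-z0-9_-]', '-', str(fp))
-- ===== Notes on version B (the rewrite author's own statement) =====
-- stated objective: idiomatic
-- what changed: The explicit character loop with whitelist membership and quadratic string concatenation is replaced by a single C-level regex substitution whose negated character class is exactly A's whitelist.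
import Mathlib
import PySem

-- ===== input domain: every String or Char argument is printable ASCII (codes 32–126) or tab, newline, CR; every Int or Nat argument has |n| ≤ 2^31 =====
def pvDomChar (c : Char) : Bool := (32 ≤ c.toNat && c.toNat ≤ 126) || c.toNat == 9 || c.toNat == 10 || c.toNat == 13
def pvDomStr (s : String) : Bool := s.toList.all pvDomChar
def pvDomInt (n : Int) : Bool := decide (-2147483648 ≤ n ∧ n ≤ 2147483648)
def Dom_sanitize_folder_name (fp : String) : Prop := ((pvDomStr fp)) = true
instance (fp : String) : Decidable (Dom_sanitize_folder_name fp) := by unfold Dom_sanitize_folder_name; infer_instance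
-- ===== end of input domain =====

-- B replaces A's explicit loop over a whitelist string with a single regex substitution
-- (idiomatic; same return value on every string input).

-- ===== PORT A =====
-- string.ascii_letters + string.digits + '-_'
def pvWhitelist : List Char :=
  "abcdefghijklmnopqrstuvwxyzABCDEFGHIJKLMNOPQRSTUVWXYZ0123456789-_".toList

def sanitize_folder_name (fp : String) : String :=
  String.mk (fp.toList.foldl
    (fun outv token => outv ++ [if pvWhitelist.contains token then token else '-']) [])

-- ===== PORT B =====
-- re.sub(r'[^A-Za-z0-9_-]', '-', str(fp)): the regex engine tests each character's
-- code against the class ranges and literals and replaces non-matches with '-'.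
def pvClassMatch (c : Char) : Bool :=
  (65 ≤ c.toNat && c.toNat ≤ 90) || (97 ≤ c.toNat && c.toNat ≤ 122) ||
  (48 ≤ c.toNat && c.toNat ≤ 57) || c.toNat == 95 || c.toNat == 45

def sanitize_folder_name_alt (fp : String) : String :=
  String.mk (fp.toList.map (fun c => if pvClassMatch c then c else '-'))

-- ===== PRECONDITION & SPEC =====
def Spec_sanitize_folder_name (fp : String) (out : String) : Prop := out = sanitize_folder_name_alt fp
instance (fp : String) (out : String) : Decidable (Spec_sanitize_folder_name fp out) := by unfold Spec_sanitize_folder_name; infer_instance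

-- ===== CLAIM (what is proved, stated in full; the proofs are below) =====
def Claim_equal_sanitize_folder_name : Prop := ∀ (fp : String), Dom_sanitize_folder_name fp → Spec_sanitize_folder_name fp (sanitize_folder_name fp)

-- ===== LEMMAS AND PROOFS =====

theorem char_toNat_injective : Function.Injective Char.toNat := by
  intro a b h
  exact Char.ext (UInt32.toNat_inj.mp h)

theorem contains_iff_class (c : Char) :
    pvWhitelist.contains c = pvClassMatch c := by
  have hmem : c ∈ pvWhitelist ↔ c.toNat ∈ pvWhitelist.map Char.toNat :=
    (List.mem_map_of_injective char_toNat_injective).symm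
  have hcls : pvClassMatch c = true ↔
      (65 ≤ c.toNat ∧ c.toNat ≤ 90) ∨ (97 ≤ c.toNat ∧ c.toNat ≤ 122) ∨
      (48 ≤ c.toNat ∧ c.toNat ≤ 57) ∨ c.toNat = 95 ∨ c.toNat = 45 := by
    simp [pvClassMatch]; tauto
  by_cases h : c ∈ pvWhitelist
  · have hn := hmem.mp h
    simp only [pvWhitelist] at hn
    simp only [List.contains_eq_mem, h, decide_true]
    symm
    rw [hcls]
    simp [List.mem_cons] at hn
    omega
  · have hn : c.toNat ∉ pvWhitelist.map Char.toNat := fun hx => h (hmem.mpr hx)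
    simp only [pvWhitelist] at hn
    simp only [List.contains_eq_mem, h, decide_false]
    symm
    rw [Bool.eq_false_iff, Ne, hcls]
    simp [List.mem_cons] at hn
    omega

theorem foldl_append_map (f : Char → Char) (l acc : List Char) :
    l.foldl (fun outv token => outv ++ [f token]) acc = acc ++ l.map f := by
  induction l generalizing acc with
  | nil => simp
  | cons x xs ih => simp [List.foldl, ih]

-- ===== VERDICT (by name: the statement is the Claim_ definition above) =====
theorem sanitize_folder_name_spec : Claim_equal_sanitize_folder_name := by
  intro fp _
  unfold Spec_sanitize_folder_name sanitize_folder_name sanitize_folder_name_alt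
  rw [foldl_append_map]
  simp only [contains_iff_class, List.nil_append]
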